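-- pv_equiv track=rewrite | github.com/gustavo-medeiros18/exercicios-codewars-cdc | exercicio-9.py | partlist
-- ===== SOURCE A (Python) =====
-- def partlist(lista_entrada):
--     lista_resultante = []
--     tam_lista = len(lista_entrada)
--     espaco = " "
--
--     for limite in range(1, tam_lista):
--         primeiro_pedaco_sublista = lista_entrada[:limite]
--         segundo_pedaco_sublista = lista_entrada[limite:]
--
--         primeiro_pedaco_str = espaco.join(primeiro_pedaco_sublista)
--         segundo_pedaco_str = espaco.join(segundo_pedaco_sublista)
--
--         tupla = (primeiro_pedaco_str, segundo_pedaco_str)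
--         lista_resultante.append(tupla)
--
--     return lista_resultante
-- ===== SOURCE B (Python) =====
-- def partlist(lista_entrada):
--     full = " ".join(lista_entrada)
--     resultado = []
--     pos = -1
--     for palavra in lista_entrada[:-1]:
--         pos += len(palavra) + 1
--         resultado.append((full[:pos], full[pos + 1:]))
--     return resultado
-- ===== Notes on version B (the rewrite author's own statement) =====
-- stated objective: faster
-- what changed: Instead of joining two fresh sublists at every split point, B joins the whole list once and produces each pair by slicing that single precomputed string at running character offsets.
import Mathlib
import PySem

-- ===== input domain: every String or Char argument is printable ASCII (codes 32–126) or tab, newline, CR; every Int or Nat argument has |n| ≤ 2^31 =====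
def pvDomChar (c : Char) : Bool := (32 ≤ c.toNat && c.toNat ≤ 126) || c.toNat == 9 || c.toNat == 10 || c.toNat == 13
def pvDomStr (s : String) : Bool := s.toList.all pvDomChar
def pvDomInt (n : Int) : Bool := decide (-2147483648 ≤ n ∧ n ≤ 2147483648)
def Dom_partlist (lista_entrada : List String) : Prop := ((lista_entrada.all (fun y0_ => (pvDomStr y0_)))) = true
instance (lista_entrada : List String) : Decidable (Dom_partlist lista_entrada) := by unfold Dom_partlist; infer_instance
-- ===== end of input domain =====

-- B joins the list once and slices that single string at running offsets instead of joining two fresh sublists per split point (constant-factor faster; same return value).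


-- ===== PORT A =====
def partlist (lista_entrada : List String) : List (String × String) :=
  (PySem.List.pyRange 1 (PySem.List.len lista_entrada) 1).foldl
    (fun lista_resultante limite =>
      let primeiro_pedaco_sublista := PySem.List.slice lista_entrada none (some limite)
      let segundo_pedaco_sublista := PySem.List.slice lista_entrada (some limite) none
      let primeiro_pedaco_str := PySem.Str.join " " primeiro_pedaco_sublista
      let segundo_pedaco_str := PySem.Str.join " " segundo_pedaco_sublista
      lista_resultante ++ [(primeiro_pedaco_str, segundo_pedaco_str)])
    []

-- ===== PORT B =====
def partlist_alt (lista_entrada : List String) : List (String × String) :=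
  let full := PySem.Str.join " " lista_entrada
  ((PySem.List.slice lista_entrada none (some (-1))).foldl
    (fun st palavra =>
      let pos := st.2 + PySem.Str.len palavra + 1
      (st.1 ++ [(PySem.Str.slice full none (some pos),
                 PySem.Str.slice full (some (pos + 1)) none)], pos))
    ([], -1)).1

-- ===== PRECONDITION & SPEC =====
def Spec_partlist (lista_entrada : List String) (out : List (String × String)) : Prop := out = partlist_alt lista_entrada
instance (lista_entrada : List String) (out : List (String × String)) : Decidable (Spec_partlist lista_entrada out) := by unfold Spec_partlist; infer_instance

-- ===== CLAIM (what is proved, stated in full; the proofs are below) =====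
def Claim_equal_partlist : Prop := ∀ (lista_entrada : List String), Dom_partlist lista_entrada → Spec_partlist lista_entrada (partlist lista_entrada)

-- ===== LEMMAS AND PROOFS =====

-- intercalate of a nonempty ++ nonempty splits around one separator
theorem pv_join_append (sep : List Char) (t d : List (List Char)) (ht : t ≠ []) (hd : d ≠ []) :
    PySem.Chars.join sep (t ++ d) = PySem.Chars.join sep t ++ sep ++ PySem.Chars.join sep d := by
  induction t with
  | nil => exact absurd rfl ht
  | cons p t ih =>
    cases t with
    | nil =>
      cases d with
      | nil => exact absurd rfl hd
      | cons q rest => simp [PySem.Chars.join_cons_cons, PySem.Chars.join_singleton]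
    | cons q t' =>
      have := ih (by simp)
      simp only [List.cons_append, PySem.Chars.join_cons_cons] at *
      simp [this]

-- foldl appending one element per step is map
theorem pv_foldl_append_map {α β : Type} (f : α → β) (xs : List α) (init : List β) :
    xs.foldl (fun acc x => acc ++ [f x]) init = init ++ xs.map f := by
  induction xs generalizing init with
  | nil => simp
  | cons x xs ih => simp [List.foldl_cons, ih, List.append_assoc]

-- the suffix pairs B's loop appends from a given running offset
def pvPairs (full : String) : Int → List String → List (String × String)
  | _, [] => []
  | pos, w :: ws =>
    let p := pos + PySem.Str.len w + 1
    (PySem.Str.slice full none (some p), PySem.Str.slice full (some (p + 1)) none)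
      :: pvPairs full p ws

theorem pv_fold_eq_pairs (full : String) (ws : List String)
    (acc : List (String × String)) (pos : Int) :
    (ws.foldl
      (fun st palavra =>
        let p := st.2 + PySem.Str.len palavra + 1
        (st.1 ++ [(PySem.Str.slice full none (some p),
                   PySem.Str.slice full (some (p + 1)) none)], p))
      (acc, pos)).1 = acc ++ pvPairs full pos ws := by
  induction ws generalizing acc pos with
  | nil => simp [pvPairs]
  | cons w ws ih =>
    rw [List.foldl_cons]
    refine (ih _ _).trans ?_
    simp [pvPairs, List.append_assoc]

theorem pv_join_len_append (t : List String) (x : String) (ht : t ≠ []) :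
    ((PySem.Str.join " " (t ++ [x])).toList.length : Int)
      = ((PySem.Str.join " " t).toList.length : Int) + PySem.Str.len x + 1 := by
  have h := pv_join_append (" ".toList) (t.map String.toList) [x.toList] (by simpa using ht) (by simp)
  simp only [PySem.Str.toList_join]
  rw [show (t ++ [x]).map String.toList = t.map String.toList ++ [x.toList] by simp]
  rw [h]
  simp [PySem.Chars.join_singleton, PySem.Str.len_eq]
  ring

-- slicing the full join at the prefix length recovers prefix and suffix joins
theorem pv_slice_at (t d : List String) (ht : t ≠ []) (hd : d ≠ []) :
    PySem.Str.slice (PySem.Str.join " " (t ++ d)) none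
        (some ((PySem.Str.join " " t).toList.length : Int)) = PySem.Str.join " " t ∧
    PySem.Str.slice (PySem.Str.join " " (t ++ d))
        (some (((PySem.Str.join " " t).toList.length : Int) + 1)) none = PySem.Str.join " " d := by
  have h := pv_join_append (" ".toList) (t.map String.toList) (d.map String.toList)
    (by simpa using ht) (by simpa using hd)
  have hfull : (PySem.Str.join " " (t ++ d)).toList
      = (PySem.Str.join " " t).toList ++ ' ' :: (PySem.Str.join " " d).toList := by
    simp only [PySem.Str.toList_join, List.map_append]
    rw [h, show (" " : String).toList = [' '] from rfl, List.append_assoc]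
    rfl
  constructor
  · rw [← String.toList_inj, PySem.Str.toList_slice, PySem.Chars.slice_eq_listSlice,
      PySem.List.slice_to_natCast, hfull]
    simp
  · rw [← String.toList_inj, PySem.Str.toList_slice, PySem.Chars.slice_eq_listSlice]
    rw [show (((PySem.Str.join " " t).toList.length : Int) + 1)
        = (((PySem.Str.join " " t).toList.length + 1 : Nat) : Int) by push_cast; ring]
    rw [PySem.List.slice_from_natCast, hfull]
    simp

-- MAIN: B's suffix pairs from offset len(join t) over d.dropLast are the split pairs
theorem pv_main (t d : List String) (ht : t ≠ []) (hd : d ≠ []) :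
    pvPairs (PySem.Str.join " " (t ++ d)) ((PySem.Str.join " " t).toList.length : Int) d.dropLast
      = (List.range (d.length - 1)).map
          (fun k => (PySem.Str.join " " (t ++ d.take (k + 1)), PySem.Str.join " " (d.drop (k + 1)))) := by
  induction d generalizing t with
  | nil => exact absurd rfl hd
  | cons x ds ih =>
    cases ds with
    | nil => simp [pvPairs]
    | cons y ds' =>
      have hds : (y :: ds') ≠ [] := by simp
      have htx : t ++ [x] ≠ [] := by simp
      have hlen := pv_join_len_append t x ht
      have hp : ((PySem.Str.join " " t).toList.length : Int) + PySem.Str.len x + 1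
          = ((PySem.Str.join " " (t ++ [x])).toList.length : Int) := by omega
      have hsl := pv_slice_at (t ++ [x]) (y :: ds') htx hds
      have hih := ih (t ++ [x]) htx hds
      simp only [List.dropLast_cons_of_ne_nil hds, pvPairs, hp]
      rw [show t ++ x :: y :: ds' = (t ++ [x]) ++ y :: ds' by simp]
      rw [hsl.1, hsl.2, hih]
      have : (x :: y :: ds').length - 1 = ((y :: ds').length - 1) + 1 := by simp
      rw [this, List.range_succ_eq_map, List.map_cons, List.map_map]
      congr 1
      apply List.map_congr_left
      intro k _
      simp [List.append_assoc]

-- A as a map over split indices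
theorem pv_A_eq_map (l : List String) :
    partlist l = (List.range (l.length - 1)).map
      (fun k => (PySem.Str.join " " (l.take (k + 1)), PySem.Str.join " " (l.drop (k + 1)))) := by
  unfold partlist
  rw [pv_foldl_append_map
    (fun limite => (PySem.Str.join " " (PySem.List.slice l none (some limite)),
                    PySem.Str.join " " (PySem.List.slice l (some limite) none)))]
  rw [PySem.List.len_eq, PySem.List.pyRange_one, List.map_map]
  have hn : (((l.length : Int)) - 1).toNat = l.length - 1 := by omega
  rw [hn]
  apply List.map_congr_left
  intro k _
  have h1 : (1 : Int) + (k : Int) = ((k + 1 : Nat) : Int) := by push_cast; ring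
  simp only [Function.comp, h1, PySem.List.slice_to_natCast, PySem.List.slice_from_natCast]

-- B as pvPairs from -1 over dropLast
theorem pv_B_eq_pairs (l : List String) :
    partlist_alt l = pvPairs (PySem.Str.join " " l) (-1) l.dropLast := by
  unfold partlist_alt
  rw [PySem.List.slice_to_neg_one]
  exact pv_fold_eq_pairs _ _ [] (-1)

-- ===== VERDICT (by name: the statement is the Claim_ definition above) =====
theorem partlist_spec : Claim_equal_partlist := by
  intro l _
  unfold Spec_partlist
  rw [pv_A_eq_map, pv_B_eq_pairs]
  cases l with
  | nil => simp [pvPairs]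
  | cons w rest =>
    cases rest with
    | nil => simp [pvPairs]
    | cons y ds =>
      have hr : (y :: ds) ≠ [] := by simp
      have hw : [w] ≠ [] := by simp
      rw [List.dropLast_cons_of_ne_nil hr]
      have hsl := pv_slice_at [w] (y :: ds) hw hr
      have hmain := pv_main [w] (y :: ds) hw hr
      simp only [pvPairs]
      have hp : (-1 : Int) + PySem.Str.len w + 1 = ((PySem.Str.join " " [w]).toList.length : Int) := by
        simp [PySem.Str.len_eq, PySem.Str.toList_join, PySem.Chars.join_singleton]
      rw [hp]
      rw [show w :: y :: ds = [w] ++ y :: ds from rfl]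
      rw [hsl.1, hsl.2, hmain]
      have : ([w] ++ y :: ds).length - 1 = ((y :: ds).length - 1) + 1 := by simp
      rw [this, List.range_succ_eq_map, List.map_cons, List.map_map]
      simp [Function.comp]
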